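-- pv_equiv track=rewrite | github.com/baiwan-chenhao/rewrite | leetcode_gen_week2.py | solve
-- ===== SOURCE A (Python) =====
-- from typing import List, Tuple
--
-- def solve(nums: List[int], k: int) -> int:
--     f0 = max_f1 = f2 = 0
--     f1 = [0] * 51  # 或者用 defaultdict(int)
--     for x in nums:
--         f2 = max(f2, max_f1) + (x == k)
--         f1[x] = max(f1[x], f0) + 1
--         f0 += (x == k)
--         max_f1 = max(max_f1, f1[x])
--     return max(max_f1, f2)
-- ===== SOURCE B (Python) =====
-- from typing import List
--
-- def solve(nums: List[int], k: int) -> int: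
--     # Combinatorial enumeration instead of DP: a valid subsequence is
--     # (all k's before index i) + (all nums[j']==v for i<=j'<=j) + (all k's after j),
--     # plus the pure-all-k's choice.  Enumerate the middle block's endpoints (i, j)
--     # with nums[i] == nums[j] and count with a prefix-count array.
--     pref = [0]
--     for x in nums:
--         pref.append(pref[-1] + (x == k))
--     n = len(nums)
--     best = pref[n]
--     for j in range(n):
--         cnt = 0
--         for i in range(j, -1, -1):
--             if nums[i] == nums[j]:
--                 cnt += 1
--                 best = max(best, pref[i] + cnt + pref[n] - pref[j + 1])
--     return best
-- ===== Notes on version B (the rewrite author's own statement) =====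
-- stated objective: alternative
-- what changed: Replaces A's one-pass fused DP (prefix-k register, 51-slot value table, switch-then-k-run register) by a non-DP combinatorial enumeration: build a prefix-count array of k and take the max over all middle-block endpoint pairs (i,j) with nums[i]==nums[j] of k's-before + block-count + k's-after, plus the all-k's choice.
-- outside the precondition, e.g. on solve([52], 0): A raises IndexError, B returns 1; on solve([-1, 50], 0): A returns 2, B returns 1
import Mathlib
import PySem

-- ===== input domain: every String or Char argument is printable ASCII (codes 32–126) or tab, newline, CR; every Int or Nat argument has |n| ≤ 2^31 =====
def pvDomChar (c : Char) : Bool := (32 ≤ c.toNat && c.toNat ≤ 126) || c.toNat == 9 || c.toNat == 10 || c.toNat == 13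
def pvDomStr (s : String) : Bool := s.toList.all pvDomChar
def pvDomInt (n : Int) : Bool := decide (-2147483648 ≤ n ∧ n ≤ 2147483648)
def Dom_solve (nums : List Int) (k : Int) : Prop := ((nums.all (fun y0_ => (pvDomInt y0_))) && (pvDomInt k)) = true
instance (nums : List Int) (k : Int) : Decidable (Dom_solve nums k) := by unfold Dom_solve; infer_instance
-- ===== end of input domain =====

-- B replaces A's one-pass fused DP registers + 51-slot value table by a non-DP
-- combinatorial enumeration of the middle block's endpoints over a prefix-count
-- array (objective: alternative, not faster).

-- ===== PORT A =====
-- `f1[x]` read/write uses Python index semantics via PySem.List.pyGetD/pySetD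
-- (exact for in-range indices; out of range Python raises IndexError — excluded by Pre_).
def solveStepA (k : Int) (st : Int × Int × Int × List Int) (x : Int) : Int × Int × Int × List Int :=
  let f0 := st.1; let maxf1 := st.2.1; let f2 := st.2.2.1; let f1 := st.2.2.2
  let f2' := max f2 maxf1 + (if x = k then 1 else 0)
  let f1' := PySem.List.pySetD f1 x (max (PySem.List.pyGetD f1 x 0) f0 + 1)
  let f0' := f0 + (if x = k then 1 else 0)
  let maxf1' := max maxf1 (PySem.List.pyGetD f1' x 0)
  (f0', maxf1', f2', f1')

def solve (nums : List Int) (k : Int) : Int :=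
  let st := nums.foldl (solveStepA k) (0, 0, 0, List.replicate 51 0)
  max st.2.1 st.2.2.1

-- ===== PORT B =====
-- pref[-1], pref[i], pref[n], pref[j+1] are Python indexing (always in range here).
def solveInnerB (nums pref : List Int) (n j : Int) (s : Int × Int) (i : Int) : Int × Int :=
  if PySem.List.pyGetD nums i 0 = PySem.List.pyGetD nums j 0 then
    (s.1 + 1,
     max s.2 (PySem.List.pyGetD pref i 0 + (s.1 + 1) +
              PySem.List.pyGetD pref n 0 - PySem.List.pyGetD pref (j + 1) 0))
  else s

def solve_alt (nums : List Int) (k : Int) : Int :=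
  let pref := nums.foldl (fun p x => p ++ [PySem.List.pyGetD p (-1) 0 + (if x = k then 1 else 0)]) ([0] : List Int)
  let n : Int := (nums.length : Int)
  let best := PySem.List.pyGetD pref n 0
  (PySem.List.pyRange 0 n 1).foldl (fun b j =>
      ((PySem.List.pyRange j (-1) (-1)).foldl (solveInnerB nums pref n j) (0, b)).2) best

-- ===== PRECONDITION & SPEC =====
-- Pre_ excludes (a) lists with an element outside [-51, 50], on which A raises
-- IndexError on the 51-slot table, and (b) lists containing two distinct values
-- congruent mod 51 (e.g. -1 and 50), where A's Python negative-index wraparound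
-- aliases the two values in one table slot — an artifact of A's fixed-size table.
def Pre_solve (nums : List Int) (k : Int) : Prop :=
  (∀ x ∈ nums, -51 ≤ x ∧ x ≤ 50) ∧ (∀ x ∈ nums, ∀ y ∈ nums, (x - y) % 51 = 0 → x = y)
instance (nums : List Int) (k : Int) : Decidable (Pre_solve nums k) := by unfold Pre_solve; infer_instance
def pvWitness_solve : List Int × Int := ([1, 7, 1, 7, 7], 7)
def Spec_solve (nums : List Int) (k : Int) (out : Int) : Prop := out = solve_alt nums k
instance (nums : List Int) (k : Int) (out : Int) : Decidable (Spec_solve nums k out) := by unfold Spec_solve; infer_instance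

-- ===== CLAIM (what is proved, stated in full; the proofs are below) =====
def Claim_equal_solve : Prop := ∀ (nums : List Int) (k : Int), Dom_solve nums k → Pre_solve nums k → Spec_solve nums k (solve nums k)

-- ===== LEMMAS AND PROOFS =====

-- number of occurrences of v in p, as an Int
def cntEq (v : Int) (p : List Int) : Int := p.foldl (fun c y => c + (if y = v then 1 else 0)) 0

-- conditional running max over a list of indices
def cmax (f : Nat → Int) (P : Nat → Bool) (r : List Nat) (a : Int) : Int :=
  r.foldl (fun m l => if P l then max m (f l) else m) a

-- reference fold: (prefix count of k, best-chain-ending-in-v function, answer-so-far)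
def refStep (k : Int) (st : Int × (Int → Int) × Int) (x : Int) : Int × (Int → Int) × Int :=
  let Fx := max (st.2.1 x) st.1 + 1
  (st.1 + (if x = k then 1 else 0),
   fun v => if v = x then Fx else st.2.1 v,
   max Fx (st.2.2 + (if x = k then 1 else 0)))

def RF (k : Int) (p : List Int) : Int × (Int → Int) × Int :=
  p.foldl (refStep k) (0, fun _ => 0, 0)

-- best "k's then v's" chain whose v-block starts at an index l of p with p[l] = v
def pMax (p : List Int) (k v : Int) : Int :=
  cmax (fun l => cntEq k (p.take l) + cntEq v (p.drop l)) (fun l => p.getD l 0 == v) (List.range p.length) 0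

def jterm (p : List Int) (k : Int) (j : Nat) : Int :=
  pMax (p.take (j+1)) k (p.getD j 0) + cntEq k (p.drop (j+1))

def jmax (p : List Int) (k : Int) : Int :=
  cmax (jterm p k) (fun _ => true) (List.range p.length) 0

-- ---- basic cntEq facts ----
theorem cntEq_shift (v : Int) (p : List Int) (a : Int) :
    p.foldl (fun c y => c + (if y = v then 1 else 0)) a = a + cntEq v p := by
  induction p generalizing a with
  | nil => simp [cntEq]
  | cons y t ih =>
    simp only [cntEq, List.foldl_cons] at *
    rw [ih, ih (0 + _)]
    omega

theorem cntEq_append (v : Int) (p q : List Int) :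
    cntEq v (p ++ q) = cntEq v p + cntEq v q := by
  simp only [cntEq, List.foldl_append]
  rw [cntEq_shift]
  rfl

theorem cntEq_nonneg (v : Int) (p : List Int) : 0 ≤ cntEq v p := by
  induction p using List.reverseRecOn with
  | nil => simp [cntEq]
  | append_singleton t x ih =>
    rw [cntEq_append]
    have : cntEq v [x] = if x = v then 1 else 0 := by simp [cntEq]
    rw [this]; split_ifs <;> omega

theorem cntEq_singleton (v x : Int) : cntEq v [x] = if x = v then 1 else 0 := by
  simp [cntEq]

-- ---- cmax facts ----
theorem cmax_append (f : Nat → Int) (P : Nat → Bool) (r s : List Nat) (a : Int) :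
    cmax f P (r ++ s) a = cmax f P s (cmax f P r a) := by
  simp [cmax, List.foldl_append]

theorem cmax_max (f : Nat → Int) (P : Nat → Bool) (r : List Nat) (a b : Int) :
    cmax f P r (max a b) = max a (cmax f P r b) := by
  induction r generalizing b with
  | nil => simp [cmax]
  | cons l t ih =>
    simp only [cmax, List.foldl_cons] at *
    by_cases h : P l
    · simp only [h, if_true]
      rw [max_assoc, ih]
    · simp only [h, if_false]
      exact ih b

theorem cmax_add (f : Nat → Int) (P : Nat → Bool) (r : List Nat) (a t : Int) :
    cmax (fun l => f l + t) P r (a + t) = cmax f P r a + t := by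
  induction r generalizing a with
  | nil => simp [cmax]
  | cons l s ih =>
    simp only [cmax, List.foldl_cons] at *
    by_cases h : P l
    · simp only [h, if_true]
      have : max (a + t) (f l + t) = max a (f l) + t := by
        simp [max_def]; split_ifs <;> omega
      rw [this, ih]
    · simp only [h, if_false]; exact ih a

theorem cmax_ge_start (f : Nat → Int) (P : Nat → Bool) (r : List Nat) (a : Int) :
    a ≤ cmax f P r a := by
  induction r generalizing a with
  | nil => simp [cmax]
  | cons l t ih =>
    simp only [cmax, List.foldl_cons] at *
    by_cases h : P l
    · simp only [h, if_true]
      exact le_trans (le_max_left a (f l)) (ih _)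
    · simp only [h, if_false]; exact ih a

theorem cmax_ge_of_mem (f : Nat → Int) (P : Nat → Bool) (r : List Nat) (a : Int)
    (l : Nat) (hl : l ∈ r) (hP : P l = true) : f l ≤ cmax f P r a := by
  induction r generalizing a with
  | nil => simp at hl
  | cons x t ih =>
    simp only [cmax, List.foldl_cons] at *
    rcases List.mem_cons.1 hl with h | h
    · subst h
      simp only [hP, if_true]
      exact le_trans (le_max_right a (f l)) (cmax_ge_start f P t _)
    · by_cases hx : P x
      · simp only [hx, if_true]; exact ih _ h
      · simp only [hx, if_false]; exact ih _ h

theorem cmax_congr (f g : Nat → Int) (P Q : Nat → Bool) (r : List Nat) (a : Int)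
    (h : ∀ l ∈ r, P l = Q l ∧ (P l = true → f l = g l)) :
    cmax f P r a = cmax g Q r a := by
  induction r generalizing a with
  | nil => rfl
  | cons x t ih =>
    simp only [cmax, List.foldl_cons] at *
    obtain ⟨h1, h2⟩ := h x (by simp)
    by_cases hx : P x
    · rw [← h1, hx]
      simp only [if_true, h2 hx]
      exact ih _ (fun l hl => h l (by simp [hl]))
    · rw [← h1]
      simp only [hx, if_false]
      exact ih _ (fun l hl => h l (by simp [hl]))

-- with a witnessed matching index of nonnegative value, a constant t ≥ 0 distributes
theorem cmax_add_of_match (f : Nat → Int) (P : Nat → Bool) (r : List Nat) (t : Int)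
    (ht : 0 ≤ t) (l0 : Nat) (hl0 : l0 ∈ r) (hP : P l0 = true) (hf : 0 ≤ f l0) :
    cmax (fun l => f l + t) P r 0 = cmax f P r 0 + t := by
  have h1 : cmax f P r 0 + t = cmax (fun l => f l + t) P r (0 + t) := (cmax_add f P r 0 t).symm
  have h3 : f l0 + t ≤ cmax (fun l => f l + t) P r 0 := by
    simpa using cmax_ge_of_mem (fun l => f l + t) P r 0 l0 hl0 hP
  have h4 := cmax_max (fun l => f l + t) P r (0 + t) 0
  rw [show max ((0:Int) + t) 0 = 0 + t from by omega] at h4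
  rw [h1, h4, max_eq_right (le_trans (by omega) h3)]

-- ---- characterization of the reference fold ----
theorem RF_append (k : Int) (p : List Int) (x : Int) :
    RF k (p ++ [x]) = refStep k (RF k p) x := by
  simp [RF, List.foldl_append]

theorem RF_C (k : Int) (p : List Int) : (RF k p).1 = cntEq k p := by
  induction p using List.reverseRecOn with
  | nil => rfl
  | append_singleton t x ih =>
    rw [RF_append, cntEq_append, cntEq_singleton]
    simp only [refStep, ih]

theorem getD_append_lt (t : List Int) (x : Int) (l : Nat) (h : l < t.length) :
    (t ++ [x]).getD l 0 = t.getD l 0 := by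
  rw [List.getD_eq_getElem?_getD, List.getElem?_append_left h, ← List.getD_eq_getElem?_getD]

theorem getD_append_len (t : List Int) (x : Int) : (t ++ [x]).getD t.length 0 = x := by
  rw [List.getD_eq_getElem?_getD, List.getElem?_concat_length]; rfl

theorem cmax_singleton (f : Nat → Int) (P : Nat → Bool) (n : Nat) (a : Int) :
    cmax f P [n] a = if P n then max a (f n) else a := by
  simp [cmax]

-- the inner candidates of pMax over t ++ [x], restricted to indices of t
theorem pMax_inner (k v x : Int) (t : List Int) :
    cmax (fun l => cntEq k ((t ++ [x]).take l) + cntEq v ((t ++ [x]).drop l))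
         (fun l => (t ++ [x]).getD l 0 == v) (List.range t.length) 0
    = cmax (fun l => (cntEq k (t.take l) + cntEq v (t.drop l)) + (if x = v then 1 else 0))
           (fun l => t.getD l 0 == v) (List.range t.length) 0 := by
  apply cmax_congr
  intro l hl
  have hl' : l < t.length := List.mem_range.1 hl
  constructor
  · rw [getD_append_lt t x l hl']
  · intro _
    rw [List.take_append_of_le_length (le_of_lt hl'),
        List.drop_append_of_le_length (le_of_lt hl'), cntEq_append, cntEq_singleton]
    omega

theorem RF_F (k : Int) (p : List Int) (v : Int) : (RF k p).2.1 v = pMax p k v := by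
  induction p using List.reverseRecOn generalizing v with
  | nil => rfl
  | append_singleton t x ih =>
    rw [RF_append]
    have hC : (RF k t).1 = cntEq k t := RF_C k t
    show (if v = x then max ((RF k t).2.1 x) ((RF k t).1) + 1 else (RF k t).2.1 v) = _
    unfold pMax
    rw [show (t ++ [x]).length = t.length + 1 from by simp, List.range_succ, cmax_append,
        pMax_inner, cmax_singleton]
    rw [show ((t ++ [x]).getD t.length 0 == v) = (x == v) from by rw [getD_append_len],
        List.take_left, List.drop_left]
    by_cases hvx : v = x
    · subst hvx
      rw [if_pos rfl, beq_self_eq_true, if_pos rfl, ih, hC, cntEq_singleton, if_pos rfl]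
      have hY := cmax_add (fun l => cntEq k (t.take l) + cntEq v (t.drop l))
        (fun l => t.getD l 0 == v) (List.range t.length) 0 1
      have hM := cmax_max (fun l => (cntEq k (t.take l) + cntEq v (t.drop l)) + 1)
        (fun l => t.getD l 0 == v) (List.range t.length) 1 0
      have hc0 := cntEq_nonneg k t
      unfold pMax
      rw [show ((0:Int) + 1) = max 1 0 from by omega] at hY
      rw [hM] at hY
      simp only [max_def] at hY ⊢
      split_ifs at hY ⊢ <;> omega
    · rw [if_neg hvx, ih]
      have hxv : (x == v) = false := by
        simp only [beq_eq_false_iff_ne, ne_eq]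
        exact fun h => hvx h.symm
      rw [hxv, if_neg (by simp)]
      unfold pMax
      have he : ∀ l : Nat, cntEq k (t.take l) + cntEq v (t.drop l) + (if x = v then 1 else 0)
          = cntEq k (t.take l) + cntEq v (t.drop l) := by
        intro l; rw [if_neg (fun h => hvx h.symm)]; omega
      simp only [he]

theorem RF_Ans (k : Int) (p : List Int) :
    (RF k p).2.2 = max (cntEq k p) (jmax p k) := by
  induction p using List.reverseRecOn with
  | nil => simp [RF, jmax, cmax, cntEq]
  | append_singleton t x ih =>
    have hF : (RF k (t ++ [x])).2.1 x = pMax (t ++ [x]) k x := RF_F k (t ++ [x]) x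
    have hL : (RF k (t ++ [x])).2.2
        = max (pMax (t ++ [x]) k x) ((RF k t).2.2 + (if x = k then 1 else 0)) := by
      rw [← hF, RF_append]
      simp [refStep]
    have hcnt : cntEq k (t ++ [x]) = cntEq k t + (if x = k then 1 else 0) := by
      rw [cntEq_append, cntEq_singleton]
    have hjj : ∀ j ∈ List.range t.length,
        jterm (t ++ [x]) k j = jterm t k j + (if x = k then 1 else 0) := by
      intro j hj
      have hj' : j < t.length := List.mem_range.1 hj
      unfold jterm
      rw [List.take_append_of_le_length (by omega), getD_append_lt t x j hj',
          List.drop_append_of_le_length (by omega), cntEq_append, cntEq_singleton]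
      omega
    have hjn : jterm (t ++ [x]) k t.length = pMax (t ++ [x]) k x := by
      unfold jterm
      rw [getD_append_len, List.take_of_length_le (by simp),
          List.drop_eq_nil_of_le (by simp)]
      show _ + cntEq k [] = _
      rw [show cntEq k [] = 0 from rfl]
      omega
    have hjm : jmax (t ++ [x]) k
        = max (cmax (fun j => jterm t k j + (if x = k then 1 else 0))
                    (fun _ => true) (List.range t.length) 0)
              (pMax (t ++ [x]) k x) := by
      unfold jmax
      rw [show (t ++ [x]).length = t.length + 1 from by simp, List.range_succ, cmax_append,
          cmax_singleton, if_pos rfl, hjn]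
      rw [cmax_congr (jterm (t ++ [x]) k) (fun j => jterm t k j + (if x = k then 1 else 0))
            (fun _ => true) (fun _ => true) (List.range t.length) 0
            (fun l hl => ⟨rfl, fun _ => hjj l hl⟩)]
    have hJ : jmax t k + (if x = k then 1 else 0)
        = max (if x = k then 1 else 0)
              (cmax (fun j => jterm t k j + (if x = k then 1 else 0))
                    (fun _ => true) (List.range t.length) 0) := by
      unfold jmax
      rw [← cmax_add (jterm t k) (fun _ => true) (List.range t.length) 0 (if x = k then 1 else 0),
          show (0 : Int) + (if x = k then 1 else 0) = max (if x = k then 1 else 0) 0 from by split_ifs <;> omega,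
          cmax_max]
    have hC0 := cntEq_nonneg k t
    rw [hL, ih, hcnt, hjm]
    simp only [max_def] at hJ ⊢
    split_ifs at hJ ⊢ <;> omega

-- ---- A-side: relating the real fold (with the 51-slot table) to RF ----
def normIdx (n : Nat) (i : Int) : Nat := (if i < 0 then i + n else i).toNat

theorem pyIdx_norm (n : Nat) (i : Int) (h1 : -(n : Int) ≤ i) (h2 : i < (n : Int)) :
    PySem.List.pyIdx? n i = some (normIdx n i) := by
  unfold PySem.List.pyIdx? normIdx
  split_ifs <;> first | omega | (simp only [Option.some.injEq]; try omega)

theorem pyGetD_norm (xs : List Int) (i : Int) (h1 : -(xs.length : Int) ≤ i) (h2 : i < xs.length) :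
    PySem.List.pyGetD xs i 0 = xs.getD (normIdx xs.length i) 0 := by
  unfold PySem.List.pyGetD PySem.List.pyGet?
  rw [pyIdx_norm _ _ h1 h2]
  simp [List.getD_eq_getElem?_getD]

theorem pySetD_norm (xs : List Int) (i v : Int) (h1 : -(xs.length : Int) ≤ i) (h2 : i < xs.length) :
    PySem.List.pySetD xs i v = xs.set (normIdx xs.length i) v := by
  unfold PySem.List.pySetD PySem.List.pySet?
  rw [pyIdx_norm _ _ h1 h2]
  simp

theorem normIdx_lt (x : Int) (h1 : -51 ≤ x) (h2 : x ≤ 50) : normIdx 51 x < 51 := by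
  unfold normIdx; split_ifs <;> omega

def InvA (nums0 : List Int) (a : Int × Int × Int × List Int) (r : Int × (Int → Int) × Int) : Prop :=
  a.1 = r.1 ∧ max a.2.1 a.2.2.1 = r.2.2 ∧ a.2.2.2.length = 51 ∧
  (∀ v ∈ nums0, PySem.List.pyGetD a.2.2.2 v 0 = r.2.1 v)

theorem stepA_inv (nums0 : List Int) (k x : Int) (a : Int × Int × Int × List Int)
    (r : Int × (Int → Int) × Int) (hx : x ∈ nums0)
    (hr : ∀ y ∈ nums0, -51 ≤ y ∧ y ≤ 50)
    (hc : ∀ y ∈ nums0, ∀ z ∈ nums0, (y - z) % 51 = 0 → y = z)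
    (hinv : InvA nums0 a r) :
    InvA nums0 (solveStepA k a x) (refStep k r x) := by
  obtain ⟨f0, maxf1, f2, f1⟩ := a
  obtain ⟨C, F, A⟩ := r
  obtain ⟨h1, h2, hlen, htab⟩ := hinv
  simp only at h1 h2 hlen htab
  obtain ⟨hx1, hx2⟩ := hr x hx
  have hxr1 : -((f1.length : Int)) ≤ x := by rw [hlen]; omega
  have hxr2 : x < (f1.length : Int) := by rw [hlen]; omega
  have hsx : normIdx 51 x < 51 := normIdx_lt x hx1 hx2
  have hget : PySem.List.pyGetD f1 x 0 = F x := htab x hx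
  have hset : PySem.List.pySetD f1 x (max (PySem.List.pyGetD f1 x 0) f0 + 1)
      = f1.set (normIdx 51 x) (max (F x) C + 1) := by
    rw [hget, h1]
    have h := pySetD_norm f1 x (max (F x) C + 1) hxr1 hxr2
    rwa [hlen] at h
  have hlen' : (f1.set (normIdx 51 x) (max (F x) C + 1)).length = 51 := by
    rw [List.length_set, hlen]
  have hget' : ∀ v ∈ nums0, PySem.List.pyGetD (f1.set (normIdx 51 x) (max (F x) C + 1)) v 0
      = if v = x then max (F x) C + 1 else F v := by
    intro v hv
    obtain ⟨hv1, hv2⟩ := hr v hv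
    have h := pyGetD_norm (f1.set (normIdx 51 x) (max (F x) C + 1)) v
      (by rw [hlen']; omega) (by rw [hlen']; omega)
    rw [h, hlen']
    by_cases hvx : v = x
    · subst hvx
      simp [List.getD_eq_getElem?_getD, List.getElem?_set, hlen, hsx]
    · have hne : normIdx 51 v ≠ normIdx 51 x := by
        intro he
        have hmod : (v - x) % 51 = 0 := by unfold normIdx at he; split_ifs at he <;> omega
        exact hvx (hc v hv x hx hmod)
      rw [if_neg hvx]
      simp only [List.getD_eq_getElem?_getD, List.getElem?_set, if_neg (Ne.symm hne)]
      have h2' := pyGetD_norm f1 v (by rw [hlen]; omega) (by rw [hlen]; omega)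
      rw [hlen] at h2'
      rw [← List.getD_eq_getElem?_getD, ← h2', htab v hv]
  unfold solveStepA refStep InvA
  simp only [hset]
  have hgx : PySem.List.pyGetD (f1.set (normIdx 51 x) (max (F x) C + 1)) x 0
      = max (F x) C + 1 := by rw [hget' x hx, if_pos rfl]
  refine ⟨?_, ?_, ?_, ?_⟩
  · rw [h1]
  · rw [hgx, ← h2]
    by_cases he : x = k
    · simp only [he, if_true, max_def]
      split_ifs <;> omega
    · simp only [he, if_false, max_def]
      split_ifs <;> omega
  · exact hlen'
  · exact hget'

theorem loopA_inv (nums0 : List Int) (k : Int) (rest : List Int)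
    (a : Int × Int × Int × List Int) (r : Int × (Int → Int) × Int)
    (hrest : ∀ y ∈ rest, y ∈ nums0)
    (hr : ∀ y ∈ nums0, -51 ≤ y ∧ y ≤ 50)
    (hc : ∀ y ∈ nums0, ∀ z ∈ nums0, (y - z) % 51 = 0 → y = z)
    (hinv : InvA nums0 a r) :
    InvA nums0 (rest.foldl (solveStepA k) a) (rest.foldl (refStep k) r) := by
  induction rest generalizing a r with
  | nil => exact hinv
  | cons x t ih =>
    simp only [List.foldl_cons]
    apply ih
    · exact fun y hy => hrest y (List.mem_cons_of_mem _ hy)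
    · exact stepA_inv nums0 k x a r (hrest x (by simp)) hr hc hinv

theorem solveA_eq (nums : List Int) (k : Int) (hpre : Pre_solve nums k) :
    solve nums k = max (cntEq k nums) (jmax nums k) := by
  have h0 : InvA nums (0, 0, 0, List.replicate 51 0) (0, fun _ => 0, 0) := by
    refine ⟨rfl, by simp, by simp, ?_⟩
    intro v hv
    obtain ⟨hv1, hv2⟩ := hpre.1 v hv
    rw [pyGetD_norm _ _ (by simp; omega) (by simp; omega)]
    have hlt := normIdx_lt v hv1 hv2
    simp only [List.length_replicate]
    rw [List.getD_eq_getElem?_getD, List.getElem?_replicate, if_pos hlt]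
    rfl
  have h := loopA_inv nums k nums (0, 0, 0, List.replicate 51 0) (0, fun _ => 0, 0)
    (fun y hy => hy) hpre.1 hpre.2 h0
  obtain ⟨-, h2, -, -⟩ := h
  have hRF : nums.foldl (refStep k) (0, fun _ => 0, 0) = RF k nums := rfl
  rw [hRF] at h2
  unfold solve
  rw [h2, RF_Ans]

-- ---- B-side ----
def prefList (k : Int) (nums : List Int) : List Int :=
  nums.foldl (fun p x => p ++ [PySem.List.pyGetD p (-1) 0 + (if x = k then 1 else 0)]) ([0] : List Int)

theorem cntEq_cons (v y : Int) (s : List Int) :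
    cntEq v (y :: s) = (if y = v then 1 else 0) + cntEq v s := by
  simp only [cntEq, List.foldl_cons]
  rw [cntEq_shift]
  simp only [cntEq]
  omega

theorem prefList_eq (k : Int) (nums : List Int) :
    prefList k nums = (List.range (nums.length + 1)).map (fun i => cntEq k (nums.take i)) := by
  induction nums using List.reverseRecOn with
  | nil => simp [prefList, cntEq]
  | append_singleton t x ih =>
    unfold prefList at *
    rw [List.foldl_append, ih]
    simp only [List.foldl_cons, List.foldl_nil]
    have hsplit : (List.range (t.length + 1)).map (fun i => cntEq k (t.take i))
        = (List.range t.length).map (fun i => cntEq k (t.take i)) ++ [cntEq k (t.take t.length)] := by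
      rw [List.range_succ, List.map_append, List.map_singleton]
    rw [hsplit, PySem.List.pyGetD_neg_one_append_singleton, ← hsplit, List.take_length]
    have hlen : (t ++ [x]).length = t.length + 1 := by simp
    rw [hlen]
    have hR : (List.range (t.length + 1 + 1)).map (fun i => cntEq k ((t ++ [x]).take i))
        = (List.range (t.length + 1)).map (fun i => cntEq k ((t ++ [x]).take i))
          ++ [cntEq k ((t ++ [x]).take (t.length + 1))] := by
      rw [List.range_succ, List.map_append, List.map_singleton]
    rw [hR]
    congr 1
    · apply List.map_congr_left
      intro i hi
      have hi' : i < t.length + 1 := List.mem_range.1 hi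
      rw [List.take_append_of_le_length (by omega)]
    · rw [List.take_of_length_le (by simp), cntEq_append, cntEq_singleton]

theorem prefList_get (k : Int) (nums : List Int) (i : Nat) (hi : i ≤ nums.length) :
    PySem.List.pyGetD (prefList k nums) (i : Int) 0 = cntEq k (nums.take i) := by
  rw [prefList_eq, PySem.List.pyGetD_natCast, PySem.List.getD_map_range _ _ _ _ (by omega)]

-- the suffix of the candidate middle block, inside nums.take (j+1)
def segB (nums : List Int) (j l : Nat) : List Int := (nums.take (j + 1)).drop l

def candB (nums : List Int) (k : Int) (j l : Nat) : Int :=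
  cntEq k (nums.take l) + cntEq (nums.getD j 0) (segB nums j l)
    + (cntEq k nums - cntEq k (nums.take (j + 1)))

theorem segB_cons (nums : List Int) (j t : Nat) (hj : j < nums.length) (ht : t ≤ j) :
    segB nums j t = nums.getD t 0 :: segB nums j (t + 1) := by
  unfold segB
  have hlt : t < (nums.take (j + 1)).length := by
    rw [List.length_take]; omega
  rw [List.drop_eq_getElem_cons hlt]
  congr 1
  rw [List.getElem_take, List.getD_eq_getElem?_getD, List.getElem?_eq_getElem (by omega)]
  rfl

theorem innerB_eq (nums : List Int) (k : Int) (j : Nat) (hj : j < nums.length) :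
    ∀ t : Nat, t ≤ j + 1 → ∀ b : Int,
      (PySem.List.pyRange ((t : Int) - 1) (-1) (-1)).foldl
          (solveInnerB nums (prefList k nums) (nums.length : Int) (j : Int))
          (cntEq (nums.getD j 0) (segB nums j t), b)
        = (cntEq (nums.getD j 0) (segB nums j 0),
           cmax (candB nums k j) (fun l => nums.getD l 0 == nums.getD j 0) (List.range t) b) := by
  intro t
  induction t with
  | zero =>
    intro _ b
    rw [show ((0 : Nat) : Int) - 1 = -1 from by simp,
        PySem.List.pyRange_neg_one_eq_nil (by omega)]
    simp [cmax]
  | succ t ih =>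
    intro ht b
    have hjv : PySem.List.pyGetD nums (j : Int) 0 = nums.getD j 0 := PySem.List.pyGetD_natCast nums j 0
    have htv : PySem.List.pyGetD nums ((t : Int)) 0 = nums.getD t 0 := PySem.List.pyGetD_natCast nums t 0
    rw [show ((t + 1 : Nat) : Int) - 1 = (t : Int) from by push_cast; omega,
        PySem.List.pyRange_neg_one_cons (by omega), List.foldl_cons]
    have hseg : segB nums j t = nums.getD t 0 :: segB nums j (t + 1) :=
      segB_cons nums j t hj (by omega)
    have hrange : List.range (t + 1) = List.range t ++ [t] := List.range_succ
    by_cases hv : nums.getD t 0 = nums.getD j 0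
    · have hstep : solveInnerB nums (prefList k nums) (nums.length : Int) (j : Int)
          (cntEq (nums.getD j 0) (segB nums j (t + 1)), b) (t : Int)
          = (cntEq (nums.getD j 0) (segB nums j t),
             max b (candB nums k j t)) := by
        unfold solveInnerB
        rw [htv, hjv, if_pos hv]
        have hc : cntEq (nums.getD j 0) (segB nums j (t + 1)) + 1
            = cntEq (nums.getD j 0) (segB nums j t) := by
          rw [hseg, cntEq_cons, if_pos hv]; omega
        have hp1 : PySem.List.pyGetD (prefList k nums) ((t : Int)) 0 = cntEq k (nums.take t) :=
          prefList_get k nums t (by omega)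
        have hp2 : PySem.List.pyGetD (prefList k nums) ((nums.length : Nat) : Int) 0
            = cntEq k nums := by
          rw [prefList_get k nums nums.length (le_refl _), List.take_length]
        have hp3 : PySem.List.pyGetD (prefList k nums) ((j : Int) + 1) 0
            = cntEq k (nums.take (j + 1)) := by
          rw [show ((j : Int) + 1) = ((j + 1 : Nat) : Int) from by push_cast; omega]
          exact prefList_get k nums (j + 1) (by omega)
        simp only [hc, hp1, hp2, hp3]
        have : cntEq k (nums.take t) + cntEq (nums.getD j 0) (segB nums j t)
              + cntEq k nums - cntEq k (nums.take (j + 1)) = candB nums k j t := by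
          unfold candB; omega
        rw [this]
      rw [hstep, ih (by omega) (max b (candB nums k j t))]
      have hPt : (nums.getD t 0 == nums.getD j 0) = true := by simpa using hv
      rw [hrange, cmax_append, cmax_singleton, hPt, if_pos rfl]
      rw [max_comm b (candB nums k j t), cmax_max, max_comm]
    · have hstep : solveInnerB nums (prefList k nums) (nums.length : Int) (j : Int)
          (cntEq (nums.getD j 0) (segB nums j (t + 1)), b) (t : Int)
          = (cntEq (nums.getD j 0) (segB nums j (t + 1)), b) := by
        unfold solveInnerB
        rw [htv, hjv, if_neg hv]
      have hc : cntEq (nums.getD j 0) (segB nums j (t + 1))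
          = cntEq (nums.getD j 0) (segB nums j t) := by
        rw [hseg, cntEq_cons, if_neg hv]; omega
      rw [hstep, hc, ih (by omega) b]
      have hPt : (nums.getD t 0 == nums.getD j 0) = false := by simpa using hv
      rw [hrange, cmax_append, cmax_singleton, hPt]
      simp

theorem segB_drop (nums : List Int) (j : Nat) : segB nums j (j + 1) = [] := by
  unfold segB
  apply List.drop_eq_nil_of_le
  rw [List.length_take]
  omega

theorem cntEq_split (k : Int) (nums : List Int) (m : Nat) :
    cntEq k nums = cntEq k (nums.take m) + cntEq k (nums.drop m) := by
  conv_lhs => rw [← List.take_append_drop m nums]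
  rw [cntEq_append]

-- the best middle block ending exactly at index j, with all k's appended on both sides
theorem MB_eq_jterm (nums : List Int) (k : Int) (j : Nat) (hj : j < nums.length) :
    cmax (candB nums k j) (fun l => nums.getD l 0 == nums.getD j 0) (List.range (j + 1)) 0
      = jterm nums k j := by
  have hT : cntEq k nums - cntEq k (nums.take (j + 1)) = cntEq k (nums.drop (j + 1)) := by
    have := cntEq_split k nums (j + 1); omega
  have hcand : candB nums k j
      = fun l => (cntEq k (nums.take l) + cntEq (nums.getD j 0) (segB nums j l))
        + cntEq k (nums.drop (j + 1)) := by
    funext l; unfold candB; omega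
  rw [hcand]
  rw [cmax_add_of_match _ _ _ _ (cntEq_nonneg k _) j (List.mem_range.2 (by omega))
      (by simp) (by have := cntEq_nonneg k (nums.take j); have := cntEq_nonneg (nums.getD j 0) (segB nums j j); omega)]
  unfold jterm
  congr 1
  unfold pMax
  rw [show (nums.take (j + 1)).length = j + 1 from by rw [List.length_take]; omega]
  apply cmax_congr
  intro l hl
  have hl' : l < j + 1 := List.mem_range.1 hl
  have hgd : (nums.take (j + 1)).getD l 0 = nums.getD l 0 := by
    rw [List.getD_eq_getElem?_getD, List.getElem?_take_of_lt hl',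
        ← List.getD_eq_getElem?_getD]
  constructor
  · rw [hgd]
  · intro _
    rw [List.take_take, min_eq_left (by omega)]
    rfl

theorem solveB_eq (nums : List Int) (k : Int) :
    solve_alt nums k = max (cntEq k nums) (jmax nums k) := by
  have hbest : PySem.List.pyGetD (prefList k nums) ((nums.length : Nat) : Int) 0 = cntEq k nums := by
    rw [prefList_get k nums nums.length (le_refl _), List.take_length]
  have outer : ∀ m : Nat, m ≤ nums.length → ∀ b : Int, 0 ≤ b →
      (PySem.List.pyRange 0 (m : Int) 1).foldl
        (fun b j => ((PySem.List.pyRange j (-1) (-1)).foldl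
            (solveInnerB nums (prefList k nums) (nums.length : Int) j) (0, b)).2) b
      = cmax (fun j => cmax (candB nums k j) (fun l => nums.getD l 0 == nums.getD j 0)
                            (List.range (j + 1)) 0)
             (fun _ => true) (List.range m) b := by
    intro m
    induction m with
    | zero =>
      intro _ b _
      rw [show ((0 : Nat) : Int) = 0 from rfl, PySem.List.pyRange_one_eq_nil (le_refl 0)]
      rfl
    | succ m ih =>
      intro hm b hb
      rw [show ((m + 1 : Nat) : Int) = (m : Int) + 1 from by push_cast; omega,
          PySem.List.pyRange_one_succ_right (by omega), List.foldl_append,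
          ih (by omega) b hb, List.foldl_cons, List.foldl_nil]
      have hb' : 0 ≤ cmax (fun j => cmax (candB nums k j)
            (fun l => nums.getD l 0 == nums.getD j 0) (List.range (j + 1)) 0)
            (fun _ => true) (List.range m) b :=
        le_trans hb (cmax_ge_start _ _ _ _)
      set b' := cmax (fun j => cmax (candB nums k j)
            (fun l => nums.getD l 0 == nums.getD j 0) (List.range (j + 1)) 0)
            (fun _ => true) (List.range m) b with hb'def
      have hinner := innerB_eq nums k m (by omega) (m + 1) (le_refl _) b'
      rw [segB_drop nums m,
          show cntEq (nums.getD m 0) ([] : List Int) = 0 from rfl,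
          show ((m + 1 : Nat) : Int) - 1 = (m : Int) from by push_cast; omega] at hinner
      have e1 : b' = max b' 0 := by omega
      have hL := cmax_max (candB nums k m) (fun l => nums.getD l 0 == nums.getD m 0)
        (List.range (m + 1)) b' 0
      rw [← e1] at hL
      have hR : cmax (fun j => cmax (candB nums k j)
            (fun l => nums.getD l 0 == nums.getD j 0) (List.range (j + 1)) 0)
            (fun _ => true) (List.range (m + 1)) b
          = max b' (cmax (candB nums k m) (fun l => nums.getD l 0 == nums.getD m 0)
                         (List.range (m + 1)) 0) := by
        rw [List.range_succ, cmax_append, ← hb'def, cmax_singleton, if_pos rfl,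
            List.range_succ]
      rw [hinner]
      show cmax (candB nums k m) (fun l => nums.getD l 0 == nums.getD m 0)
            (List.range (m + 1)) b' = _
      rw [hL, hR]
  rw [show solve_alt nums k = (PySem.List.pyRange 0 ((nums.length : Nat) : Int) 1).foldl
        (fun b j => ((PySem.List.pyRange j (-1) (-1)).foldl
            (solveInnerB nums (prefList k nums) (nums.length : Int) j) (0, b)).2)
        (PySem.List.pyGetD (prefList k nums) ((nums.length : Nat) : Int) 0) from rfl]
  rw [hbest, outer nums.length (le_refl _) (cntEq k nums) (cntEq_nonneg k nums)]
  have hfin := cmax_max (fun j => cmax (candB nums k j)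
        (fun l => nums.getD l 0 == nums.getD j 0) (List.range (j + 1)) 0)
        (fun _ => true) (List.range nums.length) (cntEq k nums) 0
  rw [show max (cntEq k nums) 0 = cntEq k nums from by have := cntEq_nonneg k nums; omega] at hfin
  rw [hfin]
  congr 1
  unfold jmax
  apply cmax_congr
  intro j hj
  exact ⟨rfl, fun _ => MB_eq_jterm nums k j (List.mem_range.1 hj)⟩

-- ===== VERDICT (by name: the statement is the Claim_ definition above) =====
theorem solve_spec : Claim_equal_solve := by
  intro nums k _ hpre
  unfold Spec_solve
  rw [solveA_eq nums k hpre, solveB_eq]
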